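-- pv_equiv track=rewrite | github.com/appuchias/aoc22 | 03/03.py | get_badges
-- ===== SOURCE A (Python) =====
-- def get_badges(rucksacks: list[tuple[str, str]], n: int = 3) -> list[str]:
--     """Returns a list of the items shared between every group of `n` elves."""
--
--     common_items = []
--     for i in range(len(rucksacks) // n):
--         rucksack = rucksacks[i * n]
--         content = rucksack[0] + rucksack[1]
--         for char in content:
--             group = [
--                 rucksacks[i * n + j][0] + rucksacks[i * n + j][1] for j in range(1, n)
--             ]
--             if all([char in rucksack for rucksack in group]):
--                 common_items.append(char)
--                 break
--
--     return common_items
-- ===== SOURCE B (Python) =====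
-- def get_badges(rucksacks: list[tuple[str, str]], n: int = 3) -> list[str]:
--     """Returns a list of the items shared between every group of `n` elves."""
--     badges = []
--     for i in range(len(rucksacks) // n):
--         group = rucksacks[i * n : (i + 1) * n]
--         shared = set.intersection(*(set(r[0] + r[1]) for r in group))
--         for char in group[0][0] + group[0][1]:
--             if char in shared:
--                 badges.append(char)
--                 break
--     return badges
-- ===== Notes on version B (the rewrite author's own statement) =====
-- stated objective: simpler
-- what changed: A rescans every other group member for each candidate character inside the char loop; B slices out the group once, precomputes the intersection of the groups' character sets, and then does one ordered scan of the first rucksack's content for the first member of that intersection.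
-- outside the precondition, e.g. on get_badges([('', ''), ('',)], 2): A returns [], B raises IndexError
import Mathlib
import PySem

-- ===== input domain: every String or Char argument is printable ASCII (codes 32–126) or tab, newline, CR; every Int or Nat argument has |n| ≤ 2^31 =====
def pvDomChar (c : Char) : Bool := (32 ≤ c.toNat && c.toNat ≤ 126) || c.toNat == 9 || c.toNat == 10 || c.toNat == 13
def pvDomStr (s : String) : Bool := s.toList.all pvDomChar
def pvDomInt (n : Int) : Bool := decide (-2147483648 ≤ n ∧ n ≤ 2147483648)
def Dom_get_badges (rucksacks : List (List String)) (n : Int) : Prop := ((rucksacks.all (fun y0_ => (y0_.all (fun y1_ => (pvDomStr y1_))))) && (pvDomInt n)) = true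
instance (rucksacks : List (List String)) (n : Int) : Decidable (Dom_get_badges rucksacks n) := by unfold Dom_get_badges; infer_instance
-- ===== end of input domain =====

-- B replaces A's per-character rescan of all group members by one precomputed
-- set intersection of the group followed by a single ordered scan (objective: simpler).

-- ===== PORT A =====
-- content of one rucksack: rucksack[0] + rucksack[1], as a list of characters
def contentA (r : List String) : List Char :=
  ((PySem.List.pyGet? r 0).getD "").toList ++ ((PySem.List.pyGet? r 1).getD "").toList

-- the inner 'for char in content: … break' loop of A (group recomputed each step, as in A)
def loopA (rucksacks : List (List String)) (i n : Int) : List Char → List String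
  | [] => []
  | c :: rest =>
    let group := (PySem.List.pyRange 1 n 1).map
      (fun j => contentA (PySem.List.pyGetD rucksacks (i * n + j) []))
    if group.all (fun g => g.contains c) then [String.ofList [c]]
    else loopA rucksacks i n rest

def get_badges (rucksacks : List (List String)) (n : Int) : List String :=
  (PySem.List.pyRange 0 (PySem.Int.floordiv rucksacks.length n) 1).foldl
    (fun common_items i =>
      let rucksack := PySem.List.pyGetD rucksacks (i * n) []
      common_items ++ loopA rucksacks i n (contentA rucksack)) []

-- ===== PORT B =====
def contentB (r : List String) : List Char :=
  ((PySem.List.pyGet? r 0).getD "").toList ++ ((PySem.List.pyGet? r 1).getD "").toList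

-- set.intersection(*(set(r[0]+r[1]) for r in group))
def sharedB (contents : List (List Char)) : PySem.Set Char :=
  match contents with
  | [] => []
  | c0 :: rest =>
    rest.foldl (fun s g => PySem.Set.inter s (PySem.Set.ofList g)) (PySem.Set.ofList c0)

def get_badges_alt (rucksacks : List (List String)) (n : Int) : List String :=
  (PySem.List.pyRange 0 (PySem.Int.floordiv rucksacks.length n) 1).foldl
    (fun badges i =>
      let group := PySem.List.slice rucksacks (some (i * n)) (some ((i + 1) * n))
      let contents := group.map contentB
      let shared := sharedB contents
      match (contents.headD []).find? (fun c => PySem.Set.contains shared c) with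
      | some c => badges ++ [String.ofList [c]]
      | none => badges) []

-- ===== PRECONDITION & SPEC =====
-- Pre_: n ≠ 0 (else ZeroDivisionError in A and B) and every rucksack of the processed
-- groups (the first (len//n)*n) has at least two components: on a short one A usually
-- raises IndexError too, except when it never reaches it because the group leader's
-- content is empty — B's intersection naturally indexes every group member and raises.
def Pre_get_badges (rucksacks : List (List String)) (n : Int) : Prop :=
  n ≠ 0 ∧ ∀ r ∈ rucksacks.take ((rucksacks.length / n.toNat) * n.toNat), 2 ≤ r.length

instance (rucksacks : List (List String)) (n : Int) : Decidable (Pre_get_badges rucksacks n) := by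
  unfold Pre_get_badges; infer_instance

def pvWitness_get_badges : List (List String) × Int :=
  ([["ab", "cb"], ["bd", "ee"], ["xy", "zb"], ["q", "r", "s"]], 3)

def Spec_get_badges (rucksacks : List (List String)) (n : Int) (out : List String) : Prop := out = get_badges_alt rucksacks n
instance (rucksacks : List (List String)) (n : Int) (out : List String) : Decidable (Spec_get_badges rucksacks n out) := by unfold Spec_get_badges; infer_instance

-- ===== CLAIM (what is proved, stated in full; the proofs are below) =====
def Claim_equal_get_badges : Prop := ∀ (rucksacks : List (List String)) (n : Int), Dom_get_badges rucksacks n → Pre_get_badges rucksacks n → Spec_get_badges rucksacks n (get_badges rucksacks n)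

-- ===== LEMMAS AND PROOFS =====

-- membership in the intersection fold of sharedB
theorem mem_interFold (rest : List (List Char)) (s0 : List Char) (c : Char) :
    c ∈ rest.foldl (fun s g => PySem.Set.inter s (PySem.Set.ofList g)) s0 ↔
      c ∈ s0 ∧ ∀ g ∈ rest, c ∈ g := by
  induction rest generalizing s0 with
  | nil => simp
  | cons g rest ih =>
    simp only [List.foldl_cons, ih, PySem.Set.mem_inter, PySem.Set.mem_ofList,
      List.mem_cons]
    constructor
    · rintro ⟨⟨h0, hg⟩, hrest⟩
      exact ⟨h0, by rintro g' (rfl | hg'); exact hg; exact hrest g' hg'⟩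
    · rintro ⟨h0, hall⟩
      exact ⟨⟨h0, hall g (Or.inl rfl)⟩, fun g' hg' => hall g' (Or.inr hg')⟩

-- A's char loop is a find? over the content
theorem loopA_eq_find (rucksacks : List (List String)) (i n : Int) (content : List Char) :
    loopA rucksacks i n content =
      match content.find? (fun c =>
          ((PySem.List.pyRange 1 n 1).map
            (fun j => contentA (PySem.List.pyGetD rucksacks (i * n + j) []))).all
          (fun g => g.contains c)) with
      | some c => [String.ofList [c]]
      | none => [] := by
  induction content with
  | nil => simp [loopA]
  | cons c rest ih =>
    rw [List.find?_cons]
    cases h : ((PySem.List.pyRange 1 n 1).map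
        (fun j => contentA (PySem.List.pyGetD rucksacks (i * n + j) []))).all
        (fun g => g.contains c) with
    | true => simp only [loopA, h, if_true]
    | false => simp only [loopA, h, Bool.false_eq_true, if_false, ih]

-- 'acc ++ (append-or-skip)' commutes with the match on the find? result
theorem append_match (acc : List String) (r : Option Char) :
    (acc ++ match r with | some c => [String.ofList [c]] | none => []) =
      match r with | some c => acc ++ [String.ofList [c]] | none => acc := by
  cases r <;> simp

-- find? only depends on the predicate's values on the list's elements
theorem find?_congr_mem {α : Type} (l : List α) (p q : α → Bool)
    (h : ∀ x ∈ l, p x = q x) : l.find? p = l.find? q := by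
  induction l with
  | nil => rfl
  | cons x xs ih =>
    simp only [List.find?_cons, h x (List.mem_cons_self)]
    split <;> [rfl; exact ih fun y hy => h y (List.mem_cons_of_mem _ hy)]

-- the group slice is the list of indexed lookups
theorem slice_eq_map_pyRange (rucksacks : List (List String)) (i n : Int)
    (hn : 0 < n) (hi0 : 0 ≤ i) (hi : i < PySem.Int.floordiv (rucksacks.length : Int) n) :
    PySem.List.slice rucksacks (some (i * n)) (some ((i + 1) * n)) =
      (PySem.List.pyRange 0 n 1).map (fun j => PySem.List.pyGetD rucksacks (i * n + j) []) := by
  have hb : (i + 1) * n ≤ (rucksacks.length : Int) := by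
    have h1 : i + 1 ≤ PySem.Int.floordiv (rucksacks.length : Int) n := by omega
    exact (PySem.Int.le_floordiv_iff_mul_le hn).mp h1
  have ha0 : 0 ≤ i * n := mul_nonneg hi0 (le_of_lt hn)
  have hb0 : 0 ≤ (i + 1) * n := mul_nonneg (by omega) (le_of_lt hn)
  have hin : (i + 1) * n = i * n + n := by ring
  rw [PySem.List.slice_toNat rucksacks ha0 hb0, PySem.List.pyRange_one, List.map_map]
  have hak : (i * n).toNat + n.toNat ≤ rucksacks.length := by omega
  apply List.ext_getElem
  · simp only [List.length_take, List.length_drop, List.length_map, List.length_range]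
    omega
  · intro j h1 h2
    simp only [List.length_take, List.length_drop] at h1
    have hj : j < n.toNat := by omega
    simp only [List.getElem_take, List.getElem_drop, List.getElem_map, List.getElem_range,
      Function.comp_apply]
    rw [PySem.List.pyGetD_eq_getElem rucksacks ([]) (by omega) (by omega)]
    congr 1
    omega

-- n < 0 (with 0 ≤ len) gives a nonpositive group count
theorem floordiv_nonpos_of_neg (a n : Int) (ha : 0 ≤ a) (hn : n < 0) :
    PySem.Int.floordiv a n ≤ 0 := by
  have h1 := PySem.Int.floordiv_mul_add_mod a n
  have h2 := (PySem.Int.mod_neg_bounds (a := a) hn).2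
  nlinarith [PySem.Int.floordiv_mul_add_mod a n]

-- ===== VERDICT (by name: the statement is the Claim_ definition above) =====
theorem get_badges_spec : Claim_equal_get_badges := by
  intro rucksacks n hdom hpre
  unfold Spec_get_badges get_badges get_badges_alt
  refine (PySem.List.foldl_congr_mem _ _ _ _ ?_).symm
  intro acc i hi
  rw [PySem.List.mem_pyRange_one] at hi
  obtain ⟨hi0, him⟩ := hi
  have hn : 0 < n := by
    rcases lt_trichotomy n 0 with h | h | h
    · have := floordiv_nonpos_of_neg (rucksacks.length : Int) n (by positivity) h
      omega
    · exact absurd h hpre.1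
    · exact h
  simp only
  rw [slice_eq_map_pyRange rucksacks i n hn hi0 him,
    PySem.List.pyRange_one_cons hn, List.map_cons, List.map_cons,
    loopA_eq_find]
  simp only [add_zero, List.headD_cons, sharedB]
  rw [find?_congr_mem (contentA (PySem.List.pyGetD rucksacks (i * n) []))
      _ (fun c => PySem.Set.contains
        ((List.map (fun j => contentB (PySem.List.pyGetD rucksacks (i * n + j) []))
            (PySem.List.pyRange 1 n 1)).foldl
          (fun s g => PySem.Set.inter s (PySem.Set.ofList g))
          (PySem.Set.ofList (contentB (PySem.List.pyGetD rucksacks (i * n) []))))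
        c) ?_]
  · rw [append_match]
    simp only [List.map_map, Function.comp_def, zero_add, contentA, contentB]
  · intro c hc
    rw [Bool.eq_iff_iff]
    constructor
    · intro hp
      rw [PySem.Set.contains_iff, mem_interFold]
      refine ⟨(PySem.Set.mem_ofList _ _).mpr hc, ?_⟩
      intro g hg
      rw [List.all_eq_true] at hp
      rcases List.mem_map.mp hg with ⟨j, hj, rfl⟩
      have := hp _ (List.mem_map.mpr ⟨j, hj, rfl⟩)
      simpa [contentA, contentB] using this
    · intro hq
      rw [PySem.Set.contains_iff, mem_interFold] at hq
      rw [List.all_eq_true]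
      intro g hg
      rcases List.mem_map.mp hg with ⟨j, hj, rfl⟩
      have := hq.2 _ (List.mem_map.mpr ⟨j, hj, rfl⟩)
      simpa [contentA, contentB] using this
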